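-- pv_equiv track=rewrite | github.com/tomastmk/EP3-Rayleigh-Ritz | resolver_sistema.py | LyB
-- ===== SOURCE A (Python) =====
-- def aij(matriz,i,j,b):
--
--     # Limite da quantidade de linhas da matriz modificada
--     if j-i>=len(matriz):
--         return 0
--
--     # Simetria
--     if i>j:
--         i,j=j,i
--
--     # Estrutura de banda
--     if j>b+i:
--         return 0
--
--     i_mod = j-i
--
--     return matriz[i_mod][i]
--
-- def LyB(Lower,b,B):
--     n = len(Lower[0])
--     Y = []
--
--     for i in range(n):
--         soma = 0
--
--         for k in range(0,i,1):
--             soma+=aij(Lower,i,k,b)*Y[k]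
--
--         yi = B[i]-soma
--
--         Y.append(yi)
--
--     return Y
-- ===== SOURCE B (Python) =====
-- def LyB(Lower, b, B):
--     # Column-oriented (scatter) forward substitution: once y_k is known, its
--     # contribution is pushed forward into the residuals of the later rows,
--     # so no row ever gathers over earlier entries.
--     n = len(Lower[0])
--     Y = [B[i] for i in range(n)]
--     for k in range(n):
--         yk = Y[k]
--         for d in range(1, len(Lower)):
--             j = k + d
--             if d <= b and j < n:
--                 Y[j] -= Lower[d][k] * yk
--     return Y
-- ===== Notes on version B (the rewrite author's own statement) =====
-- stated objective: alternative
-- what changed: B replaces A's row-oriented gather (each row i sums aij-filtered products over all k < i) by a column-oriented scatter: it initialises Y = B and, as soon as y_k is final, pushes its contribution forward into the later residuals Y[k+d] for the stored diagonals d, so no row ever gathers over earlier entries and the aij helper disappears.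
import Mathlib
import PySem

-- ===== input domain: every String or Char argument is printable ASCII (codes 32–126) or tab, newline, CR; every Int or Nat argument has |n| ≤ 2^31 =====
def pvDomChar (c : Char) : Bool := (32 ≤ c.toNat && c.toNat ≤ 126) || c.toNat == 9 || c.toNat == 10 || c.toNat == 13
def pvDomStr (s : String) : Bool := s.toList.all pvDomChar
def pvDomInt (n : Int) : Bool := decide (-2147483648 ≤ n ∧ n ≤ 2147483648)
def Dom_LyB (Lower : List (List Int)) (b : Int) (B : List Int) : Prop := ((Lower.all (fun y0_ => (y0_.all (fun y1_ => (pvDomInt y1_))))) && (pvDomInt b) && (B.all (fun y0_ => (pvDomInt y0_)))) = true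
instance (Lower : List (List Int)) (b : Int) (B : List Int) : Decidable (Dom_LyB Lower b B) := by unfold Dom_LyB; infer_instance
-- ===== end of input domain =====

-- A gathers each y_i by scanning all k < i through the symmetry/band helper aij;
-- B is the column-oriented (scatter) forward substitution: Y starts as a copy of B and
-- each finished y_k is pushed forward into the residuals of the later rows.

-- ===== PORT A =====
-- literal port of `aij`; the indexing matriz[i_mod][i] becomes pyGetD
-- (Pre_LyB excludes exactly the inputs where that access raises IndexError)
def aijP (matriz : List (List Int)) (i j b : Int) : Int :=
  if (matriz.length : Int) ≤ j - i then 0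
  else
    let ij := if i > j then (j, i) else (i, j)
    if ij.2 > b + ij.1 then 0
    else PySem.List.pyGetD (PySem.List.pyGetD matriz (ij.2 - ij.1) []) ij.1 0

def LyB (Lower : List (List Int)) (b : Int) (B : List Int) : List Int :=
  let n : Int := ((PySem.List.pyGet? Lower 0).getD []).length
  (PySem.List.pyRange 0 n 1).foldl (fun Y i =>
    let soma := (PySem.List.pyRange 0 i 1).foldl
      (fun s k => s + aijP Lower i k b * PySem.List.pyGetD Y k 0) 0
    Y ++ [PySem.List.pyGetD B i 0 - soma]) []

-- ===== PORT B =====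
def LyB_alt (Lower : List (List Int)) (b : Int) (B : List Int) : List Int :=
  let n : Int := ((PySem.List.pyGet? Lower 0).getD []).length
  let Y0 := (PySem.List.pyRange 0 n 1).map (fun i => PySem.List.pyGetD B i 0)
  (PySem.List.pyRange 0 n 1).foldl (fun Y k =>
    let yk := PySem.List.pyGetD Y k 0
    (PySem.List.pyRange 1 (Lower.length : Int) 1).foldl (fun Y d =>
      if d ≤ b ∧ k + d < n then
        PySem.List.pySetD Y (k + d)
          (PySem.List.pyGetD Y (k + d) 0
            - PySem.List.pyGetD (PySem.List.pyGetD Lower d []) k 0 * yk)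
      else Y) Y) Y0

-- ===== PRECONDITION & SPEC =====
-- Pre_ excludes exactly the inputs where Python A raises: Lower empty (IndexError on
-- Lower[0]), B shorter than n (IndexError on B[i]), or an in-band access Lower[i-k][k]
-- made by the loops whose diagonal or column is not stored (IndexError in aij).
def Pre_LyB (Lower : List (List Int)) (b : Int) (B : List Int) : Prop :=
  Lower ≠ [] ∧
  ((PySem.List.pyGet? Lower 0).getD []).length ≤ B.length ∧
  ∀ i < ((PySem.List.pyGet? Lower 0).getD []).length, ∀ k < i,
    (i : Int) ≤ b + k →
      i - k < Lower.length ∧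
      k < ((PySem.List.pyGet? Lower ((i : Int) - (k : Int))).getD []).length
instance (Lower : List (List Int)) (b : Int) (B : List Int) : Decidable (Pre_LyB Lower b B) := by
  unfold Pre_LyB; infer_instance

def pvWitness_LyB : List (List Int) × Int × List Int := ([[1, 0], [5]], 1, [3, 4])

def Spec_LyB (Lower : List (List Int)) (b : Int) (B : List Int) (out : List Int) : Prop := out = LyB_alt Lower b B
instance (Lower : List (List Int)) (b : Int) (B : List Int) (out : List Int) : Decidable (Spec_LyB Lower b B out) := by unfold Spec_LyB; infer_instance

-- ===== CLAIM (what is proved, stated in full; the proofs are below) =====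
def Claim_equal_LyB : Prop := ∀ (Lower : List (List Int)) (b : Int) (B : List Int), Dom_LyB Lower b B → Pre_LyB Lower b B → Spec_LyB Lower b B (LyB Lower b B)

-- ===== LEMMAS AND PROOFS =====

-- the (mathematical) band entry used for row i, column k (only cited with k < i)
def cEnt (Lower : List (List Int)) (b : Int) (i k : Nat) : Int :=
  if (i : Int) ≤ b + (k : Int) then (Lower.getD (i - k) []).getD k 0 else 0

-- the solution sequence, by strong recursion: y_i = B[i] - Σ_{k<i} cEnt i k * y_k
def yS (Lower : List (List Int)) (b : Int) (B : List Int) : Nat → Int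
  | i =>
    B.getD i 0 -
      ((List.range i).attach.map (fun p =>
        cEnt Lower b i p.1 * yS Lower b B p.1)).sum
decreasing_by exact List.mem_range.mp p.2

theorem yS_eq (Lower : List (List Int)) (b : Int) (B : List Int) (i : Nat) :
    yS Lower b B i =
      B.getD i 0 - ((List.range i).map (fun k => cEnt Lower b i k * yS Lower b B k)).sum := by
  rw [yS]
  congr 1
  simp


-- A's aij equals the band entry cEnt when called with column k below row i
theorem aijP_cEnt (Lower : List (List Int)) (b : Int) (i k : Nat) (h : k < i) :
    aijP Lower (i : Int) (k : Int) b = cEnt Lower b i k := by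
  unfold aijP cEnt
  have h0 : ¬ ((Lower.length : Int) ≤ (k : Int) - (i : Int)) := by
    have : (0 : Int) ≤ Lower.length := Int.natCast_nonneg _
    omega
  rw [if_neg h0, if_pos (by exact_mod_cast h : (i : Int) > (k : Int))]
  simp only
  by_cases hb : (i : Int) ≤ b + (k : Int)
  · rw [if_neg (by omega), if_pos hb]
    have hik : (i : Int) - (k : Int) = ((i - k : Nat) : Int) := by omega
    rw [hik, PySem.List.pyGetD_natCast, PySem.List.pyGetD_natCast]
  · rw [if_pos (by omega), if_neg hb]

-- A's loop builds exactly the solution sequence yS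
theorem lemA (Lower : List (List Int)) (b : Int) (B : List Int) (m : Nat) :
    (PySem.List.pyRange 0 (m : Int) 1).foldl (fun Y i =>
      let soma := (PySem.List.pyRange 0 i 1).foldl
        (fun s k => s + aijP Lower i k b * PySem.List.pyGetD Y k 0) 0
      Y ++ [PySem.List.pyGetD B i 0 - soma]) []
    = (List.range m).map (yS Lower b B) := by
  induction m with
  | zero => simp [PySem.List.pyRange_one_eq_nil (by omega : (0:Int) ≤ 0)]
  | succ m ih =>
    rw [show ((m + 1 : Nat) : Int) = (m : Int) + 1 by push_cast; ring,
        PySem.List.pyRange_one_succ_right (by exact_mod_cast Nat.zero_le m),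
        List.foldl_append, ih]
    simp only [List.foldl_cons, List.foldl_nil]
    rw [List.range_succ, List.map_append, List.map_singleton]
    congr 1
    have hsoma :
        (PySem.List.pyRange 0 (m : Int) 1).foldl
          (fun s k => s + aijP Lower (m : Int) k b
            * PySem.List.pyGetD ((List.range m).map (yS Lower b B)) k 0) 0
        = ((List.range m).map (fun k => cEnt Lower b m k * yS Lower b B k)).sum := by
      rw [PySem.List.foldl_add, PySem.List.pyRange_zero_natCast, List.map_map, zero_add]
      refine congrArg List.sum (List.map_congr_left ?_)
      intro k hk
      have hkm : k < m := List.mem_range.mp hk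
      simp only [Function.comp]
      rw [PySem.List.pyGetD_natCast, PySem.List.getD_map_range _ _ _ _ hkm,
          aijP_cEnt Lower b m k hkm]
    rw [hsoma, PySem.List.pyGetD_natCast, ← yS_eq]

-- the partial residual after the first K columns have been scattered
def pF (Lower : List (List Int)) (b : Int) (B : List Int) (K j : Nat) : Int :=
  B.getD j 0 -
    ((List.range (min K j)).map (fun m => cEnt Lower b j m * yS Lower b B m)).sum

theorem pF_self (Lower : List (List Int)) (b : Int) (B : List Int) (K j : Nat)
    (h : j ≤ K) : pF Lower b B K j = yS Lower b B j := by
  unfold pF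
  rw [Nat.min_eq_right h, ← yS_eq]

-- one inner (scatter) loop, over the first D stored diagonals, pointwise
theorem innerLem (Lower : List (List Int)) (b : Int) (B : List Int)
    (K n : Nat) (f : Nat → Int) (D : Nat) :
    (PySem.List.pyRange 1 (D : Int) 1).foldl (fun Y d =>
      if d ≤ b ∧ (K : Int) + d < (n : Int) then
        PySem.List.pySetD Y ((K : Int) + d)
          (PySem.List.pyGetD Y ((K : Int) + d) 0
            - PySem.List.pyGetD (PySem.List.pyGetD Lower d []) (K : Int) 0
              * yS Lower b B K)
      else Y) ((List.range n).map f)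
    = (List.range n).map (fun j =>
        if K < j ∧ j - K < D ∧ (j : Int) ≤ b + (K : Int) then
          f j - (Lower.getD (j - K) []).getD K 0 * yS Lower b B K
        else f j) := by
  induction D with
  | zero =>
    rw [Nat.cast_zero, PySem.List.pyRange_one_eq_nil (by omega : (0:Int) ≤ 1), List.foldl_nil]
    refine (List.map_congr_left ?_).symm
    intro j _
    rw [if_neg (by omega)]
  | succ D ih =>
    by_cases hD : 1 ≤ D
    · rw [show ((D + 1 : Nat) : Int) = (D : Int) + 1 by push_cast; ring,
          PySem.List.pyRange_one_succ_right (by exact_mod_cast hD),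
          List.foldl_append, ih, List.foldl_cons, List.foldl_nil]
      by_cases hg : (D : Int) ≤ b ∧ (K : Int) + (D : Int) < (n : Int)
      · rw [if_pos hg]
        have hKD : K + D < n := by omega
        have hcast : (K : Int) + (D : Int) = ((K + D : Nat) : Int) := by push_cast; ring
        rw [hcast, PySem.List.pySetD_natCast, PySem.List.pyGetD_natCast,
            PySem.List.pyGetD_natCast, PySem.List.pyGetD_natCast,
            PySem.List.getD_map_range _ _ _ _ hKD]
        apply List.ext_getElem
        · simp
        · intro j hj hj'
          simp only [List.length_set, List.length_map, List.length_range] at hj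
          rw [List.getElem_set, List.getElem_map, List.getElem_range,
              List.getElem_map, List.getElem_range]
          obtain ⟨hg1, hg2⟩ := hg
          by_cases hjKD : K + D = j
          · rw [if_pos hjKD]
            subst hjKD
            rw [if_neg (by omega : ¬ (K < K + D ∧ K + D - K < D ∧ ((K + D : Nat) : Int) ≤ b + (K : Int))),
                if_pos (show K < K + D ∧ K + D - K < D + 1 ∧ ((K + D : Nat) : Int) ≤ b + (K : Int) from
                  ⟨by omega, by omega, by push_cast; omega⟩),
                show K + D - K = D by omega,
                show (Lower.getD D []).getD K 0
                  = PySem.List.pyGetD (PySem.List.pyGetD Lower (D : Int) []) (K : Int) 0 by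
                  rw [PySem.List.pyGetD_natCast, PySem.List.pyGetD_natCast]]
          · rw [if_neg hjKD]
            by_cases hb' : (j : Int) ≤ b + (K : Int)
            · by_cases hc : K < j ∧ j - K < D
              · rw [if_pos ⟨hc.1, hc.2, hb'⟩, if_pos ⟨hc.1, by omega, hb'⟩]
              · rw [if_neg (by omega), if_neg (by omega)]
            · rw [if_neg (by tauto), if_neg (by tauto)]
      · rw [if_neg hg]
        refine List.map_congr_left ?_
        intro j hjmem
        have hj : j < n := List.mem_range.mp hjmem
        by_cases hb' : (j : Int) ≤ b + (K : Int)
        · by_cases hc : K < j ∧ j - K < D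
          · rw [if_pos ⟨hc.1, hc.2, hb'⟩, if_pos ⟨hc.1, by omega, hb'⟩]
          · have hnot : ¬ (K < j ∧ j - K < D + 1 ∧ (j : Int) ≤ b + (K : Int)) := by
              rintro ⟨h1, h2, _⟩
              have hjKD : j = K + D := by omega
              subst hjKD
              push_cast at hb' hg
              omega
            rw [if_neg (by omega), if_neg hnot]
        · rw [if_neg (by tauto), if_neg (by tauto)]
    · have hD0 : D = 0 := by omega
      subst hD0
      rw [show ((1 : Nat) : Int) = 1 by norm_num,
          PySem.List.pyRange_one_eq_nil (by omega : (1:Int) ≤ 1), List.foldl_nil]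
      refine (List.map_congr_left ?_).symm
      intro j _
      rw [if_neg (by omega)]

-- the outer loop of B keeps Y = the residuals pF K
theorem lemB (Lower : List (List Int)) (b : Int) (B : List Int) (n : Nat)
    (K : Nat) (hK : K ≤ n) :
    (PySem.List.pyRange 0 (K : Int) 1).foldl (fun Y k =>
      let yk := PySem.List.pyGetD Y k 0
      (PySem.List.pyRange 1 (Lower.length : Int) 1).foldl (fun Y d =>
        if d ≤ b ∧ k + d < (n : Int) then
          PySem.List.pySetD Y (k + d)
            (PySem.List.pyGetD Y (k + d) 0
              - PySem.List.pyGetD (PySem.List.pyGetD Lower d []) k 0 * yk)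
        else Y) Y) ((List.range n).map (pF Lower b B 0))
    = (List.range n).map (pF Lower b B K) := by
  induction K with
  | zero => rw [Nat.cast_zero, PySem.List.pyRange_one_eq_nil (by omega : (0:Int) ≤ 0), List.foldl_nil]
  | succ K ih =>
    have hKn : K < n := by omega
    rw [show ((K + 1 : Nat) : Int) = (K : Int) + 1 by push_cast; ring,
        PySem.List.pyRange_one_succ_right (by exact_mod_cast Nat.zero_le K),
        List.foldl_append, ih (by omega), List.foldl_cons, List.foldl_nil]
    simp only
    rw [PySem.List.pyGetD_natCast, PySem.List.getD_map_range _ _ _ _ hKn,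
        pF_self Lower b B K K le_rfl,
        innerLem Lower b B K n (pF Lower b B K) Lower.length]
    refine List.map_congr_left ?_
    intro j hjmem
    have hj : j < n := List.mem_range.mp hjmem
    by_cases hKj : K < j
    · have hmin : min (K + 1) j = K + 1 := by omega
      have hmin' : min K j = K := by omega
      have hpf : pF Lower b B (K + 1) j
          = pF Lower b B K j - cEnt Lower b j K * yS Lower b B K := by
        unfold pF
        rw [hmin, hmin', List.range_succ, List.map_append, List.sum_append,
            List.map_singleton, List.sum_singleton]
        ring
      by_cases hb' : (j : Int) ≤ b + (K : Int)
      · by_cases hnd : j - K < Lower.length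
        · rw [if_pos ⟨hKj, hnd, hb'⟩, hpf]
          unfold cEnt
          rw [if_pos hb']
        · rw [if_neg (by omega), hpf]
          unfold cEnt
          rw [if_pos hb', List.getD_eq_default Lower ([] : List Int) (by omega : Lower.length ≤ j - K)]
          simp
      · rw [if_neg (by tauto), hpf]
        unfold cEnt
        rw [if_neg hb']
        simp
    · rw [if_neg (by omega)]
      unfold pF
      rw [show min (K + 1) j = min K j by omega]

-- ===== VERDICT (by name: the statement is the Claim_ definition above) =====
theorem LyB_spec : Claim_equal_LyB := by
  intro Lower b B _hDom _hPre
  unfold Spec_LyB LyB LyB_alt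
  simp only
  set nN : Nat := ((PySem.List.pyGet? Lower 0).getD []).length with hnN
  rw [lemA Lower b B nN]
  have hY0 : (PySem.List.pyRange 0 (nN : Int) 1).map (fun i => PySem.List.pyGetD B i 0)
      = (List.range nN).map (pF Lower b B 0) := by
    rw [PySem.List.pyRange_zero_natCast, List.map_map]
    refine List.map_congr_left ?_
    intro j _
    simp only [Function.comp]
    rw [PySem.List.pyGetD_natCast]
    unfold pF
    simp
  rw [hY0, lemB Lower b B nN nN le_rfl]
  refine List.map_congr_left ?_
  intro j hjmem
  exact (pF_self Lower b B nN j (le_of_lt (List.mem_range.mp hjmem))).symm
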